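-- pv_equiv track=rewrite | github.com/seryrzu/centroFlye | scripts/submonomers/submonomers_extraction.py | _reduce2shortest
-- ===== SOURCE A (Python) =====
-- def _reduce2shortest(reduced2overlaps):
--     seq2shortest = {s: s for s in reduced2overlaps.values()}
--     for s1 in reduced2overlaps.values():
--         for s2 in reduced2overlaps.values():
--             if len(s2) >= len(seq2shortest[s1]):
--                 continue
--             if s2 in s1:
--                 seq2shortest[s1] = s2
--     reduced2shortest = {}
--     for s, cs in reduced2overlaps.items():
--         reduced2shortest[s] = seq2shortest[cs]
--     return reduced2shortest
-- ===== SOURCE B (Python) =====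
-- def _reduce2shortest(reduced2overlaps):
--     sorted_vals = sorted(reduced2overlaps.values(), key=len)
--
--     def shortest(s1):
--         for s2 in sorted_vals:
--             if s2 in s1:
--                 return s2
--         return s1
--
--     return {s: shortest(cs) for s, cs in reduced2overlaps.items()}
-- ===== Notes on version B (the rewrite author's own statement) =====
-- stated objective: faster
-- what changed: Replaces A's running-minimum double scan over a mutated dict with one stable sort of the values by length followed by a first-substring-hit scan (early break) per value.
import Mathlib
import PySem

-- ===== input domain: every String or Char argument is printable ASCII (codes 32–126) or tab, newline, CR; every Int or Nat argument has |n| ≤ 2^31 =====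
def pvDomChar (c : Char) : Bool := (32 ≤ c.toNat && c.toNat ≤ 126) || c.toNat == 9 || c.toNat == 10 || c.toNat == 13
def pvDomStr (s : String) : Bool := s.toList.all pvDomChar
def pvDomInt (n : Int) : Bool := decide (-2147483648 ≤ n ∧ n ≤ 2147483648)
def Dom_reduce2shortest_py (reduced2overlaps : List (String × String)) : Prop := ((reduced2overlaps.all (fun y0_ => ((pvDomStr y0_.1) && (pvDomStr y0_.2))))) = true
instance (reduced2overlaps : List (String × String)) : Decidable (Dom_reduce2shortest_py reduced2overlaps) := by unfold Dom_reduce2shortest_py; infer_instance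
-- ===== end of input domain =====

-- B replaces A's running-minimum double scan with a stable sort of the values by length
-- followed by a first-substring-hit scan per value that stops at the first hit (measured faster).

-- ===== PORT A =====
-- getD with default "" is safe: every key looked up is present in the dict at that point.
def reduce2shortest_py (reduced2overlaps : List (String × String)) : List (String × String) :=
  let d := PySem.Dict.ofList reduced2overlaps
  let seq2shortest := d.values.foldl (fun m s => m.insert s s)
    (PySem.Dict.empty : PySem.Dict String String)
  let seq2shortest := d.values.foldl (fun m s1 =>
    d.values.foldl (fun m s2 =>
      if PySem.Str.len (m.getD s1 "") ≤ PySem.Str.len s2 then m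
      else if PySem.Str.isIn s2 s1 then m.insert s1 s2 else m) m) seq2shortest
  let reduced2shortest := d.items.foldl (fun m p => m.insert p.1 (seq2shortest.getD p.2 ""))
    (PySem.Dict.empty : PySem.Dict String String)
  reduced2shortest.items

-- ===== PORT B =====
-- 'for s2 in sorted_vals: if s2 in s1: return s2' with the 'return s1' fallback
def pvFirstHit (sortedVals : List String) (s1 : String) : String :=
  match sortedVals with
  | [] => s1
  | s2 :: rest => if PySem.Str.isIn s2 s1 then s2 else pvFirstHit rest s1

def reduce2shortest_py_alt (reduced2overlaps : List (String × String)) : List (String × String) :=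
  let d := PySem.Dict.ofList reduced2overlaps
  let sortedVals := PySem.List.sorted d.values (fun s => PySem.Str.len s) false
  d.items.map (fun p => (p.1, pvFirstHit sortedVals p.2))

-- ===== PRECONDITION & SPEC =====
def Spec_reduce2shortest_py (reduced2overlaps : List (String × String)) (out : List (String × String)) : Prop := out = reduce2shortest_py_alt reduced2overlaps
instance (reduced2overlaps : List (String × String)) (out : List (String × String)) : Decidable (Spec_reduce2shortest_py reduced2overlaps out) := by unfold Spec_reduce2shortest_py; infer_instance

-- ===== CLAIM (what is proved, stated in full; the proofs are below) =====
def Claim_equal_reduce2shortest_py : Prop := ∀ (reduced2overlaps : List (String × String)), Dom_reduce2shortest_py reduced2overlaps → Spec_reduce2shortest_py reduced2overlaps (reduce2shortest_py reduced2overlaps)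

-- ===== LEMMAS AND PROOFS =====

-- A's inner-loop update of the running value for a fixed s1
def pvStep (s1 b s2 : String) : String :=
  if PySem.Str.len b ≤ PySem.Str.len s2 then b
  else if PySem.Str.isIn s2 s1 then s2 else b

theorem pv_sub_eq {x s : String} (h : PySem.Str.isIn x s = true)
    (hl : PySem.Str.len s ≤ PySem.Str.len x) : x = s := by
  rw [PySem.Str.isIn_iff_infix] at h
  simp only [PySem.Str.len_eq] at hl
  have : x.toList.length ≥ s.toList.length := by exact_mod_cast hl
  exact String.toList_inj.mp (h.eq_of_length_le this)
theorem pvFirstHit_mem_or (S : List String) (s1 : String) :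
    pvFirstHit S s1 ∈ S ∨ pvFirstHit S s1 = s1 := by
  induction S with
  | nil => exact Or.inr rfl
  | cons y ys ih =>
    simp only [pvFirstHit]
    split
    · exact Or.inl (List.mem_cons_self)
    · rcases ih with h | h
      · exact Or.inl (List.mem_cons_of_mem _ h)
      · exact Or.inr h

theorem pvFirstHit_cons (a : String) (l : List String) (s1 : String) :
    pvFirstHit (a :: l) s1 = if PySem.Str.isIn a s1 then a else pvFirstHit l s1 := rfl

theorem pvKey (S : List String) (x s1 : String)
    (hp : S.Pairwise (fun a b => PySem.Str.len a ≤ PySem.Str.len b)) :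
    pvFirstHit (PySem.List.insertBy (fun a b => decide (PySem.Str.len a < PySem.Str.len b)) x S) s1
      = pvStep s1 (pvFirstHit S s1) x := by
  induction S with
  | nil =>
    show pvFirstHit [x] s1 = pvStep s1 (pvFirstHit [] s1) x
    rw [pvFirstHit_cons]
    show (if PySem.Str.isIn x s1 then x else s1) = pvStep s1 s1 x
    unfold pvStep
    by_cases hin : PySem.Str.isIn x s1 = true
    · rw [if_pos hin]
      by_cases hle : PySem.Str.len s1 ≤ PySem.Str.len x
      · rw [if_pos hle]; exact pv_sub_eq hin hle
      · rw [if_neg hle]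
    · rw [if_neg hin]
      split <;> rfl
  | cons y ys ih =>
    rcases List.pairwise_cons.mp hp with ⟨hy, hys⟩
    simp only [PySem.List.insertBy]
    by_cases hlt : PySem.Str.len x < PySem.Str.len y
    · rw [if_pos (by simpa using hlt)]
      rw [pvFirstHit_cons x (y :: ys) s1]
      by_cases hin : PySem.Str.isIn x s1 = true
      · rw [if_pos hin]
        have hrcases : pvFirstHit (y :: ys) s1 ∈ y :: ys ∨ pvFirstHit (y :: ys) s1 = s1 :=
          pvFirstHit_mem_or _ _
        unfold pvStep
        by_cases hbig : PySem.Str.len (pvFirstHit (y :: ys) s1) ≤ PySem.Str.len x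
        · rw [if_pos hbig]
          rcases hrcases with hmem | heq
          · exfalso
            rcases List.mem_cons.mp hmem with he | hmem'
            · rw [he] at hbig; omega
            · have h1 := hy _ hmem'; omega
          · rw [heq] at hbig ⊢
            exact pv_sub_eq hin hbig
        · rw [if_neg hbig, if_pos hin]
      · rw [if_neg hin]
        unfold pvStep
        rw [if_neg hin]
        split <;> rfl
    · rw [if_neg (by simpa using hlt)]
      rw [pvFirstHit_cons y _ s1, pvFirstHit_cons y ys s1]
      by_cases hiny : PySem.Str.isIn y s1 = true
      · rw [if_pos hiny, if_pos hiny]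
        unfold pvStep
        rw [if_pos (by omega)]
      · rw [if_neg hiny, if_neg hiny]
        exact ih hys

theorem pvMain (vals : List String) (s1 : String) :
    vals.foldl (fun b s2 => pvStep s1 b s2) s1
      = pvFirstHit (PySem.List.sorted vals (fun s => PySem.Str.len s) false) s1 := by
  induction vals using List.reverseRecOn with
  | nil => rfl
  | append_singleton ys x ih =>
    rw [List.foldl_append]
    have hs : PySem.List.sorted (ys ++ [x]) (fun s => PySem.Str.len s) false
        = PySem.List.insertBy (fun a b => decide (PySem.Str.len a < PySem.Str.len b)) x
            (PySem.List.sorted ys (fun s => PySem.Str.len s) false) := by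
      rw [PySem.List.sorted_eq_foldl_insertBy, PySem.List.sorted_eq_foldl_insertBy,
        List.foldl_append, List.foldl_cons, List.foldl_nil]
    rw [hs, pvKey _ _ _ (PySem.List.sorted_pairwise ys (fun s => PySem.Str.len s)),
      ih, List.foldl_cons, List.foldl_nil]

theorem pvInner (xs : List String) (m : PySem.Dict String String) (s1 k : String) :
    ((xs.foldl (fun m s2 =>
      if PySem.Str.len (m.getD s1 "") ≤ PySem.Str.len s2 then m
      else if PySem.Str.isIn s2 s1 then m.insert s1 s2 else m) m)).getD k ""
    = if k = s1 then xs.foldl (fun b s2 => pvStep s1 b s2) (m.getD s1 "") else m.getD k "" := by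
  induction xs generalizing m with
  | nil =>
    simp only [List.foldl_nil]
    split
    · rename_i h; rw [h]
    · rfl
  | cons x xs ih =>
    have h1 : ((if PySem.Str.len (m.getD s1 "") ≤ PySem.Str.len x then m
        else if PySem.Str.isIn x s1 then m.insert s1 x else m) : PySem.Dict String String).getD s1 ""
          = pvStep s1 (m.getD s1 "") x := by
      unfold pvStep
      split
      · rfl
      · split
        · rw [PySem.Dict.getD_insert]; simp
        · rfl
    have h2 : ¬ k = s1 → ((if PySem.Str.len (m.getD s1 "") ≤ PySem.Str.len x then m
        else if PySem.Str.isIn x s1 then m.insert s1 x else m) : PySem.Dict String String).getD k ""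
          = m.getD k "" := by
      intro hk
      split
      · rfl
      · split
        · rw [PySem.Dict.getD_insert, if_neg hk]
        · rfl
    simp only [List.foldl_cons]
    rw [ih]
    by_cases hk : k = s1
    · rw [if_pos hk, if_pos hk, h1]
    · rw [if_neg hk, if_neg hk, h2 hk]

theorem pvIdem (xs : List String) (s1 b : String)
    (h : ∀ x ∈ xs, PySem.Str.isIn x s1 = true → PySem.Str.len b ≤ PySem.Str.len x) :
    xs.foldl (fun b s2 => pvStep s1 b s2) b = b := by
  induction xs with
  | nil => rfl
  | cons x xs ih =>
    have hx : pvStep s1 b x = b := by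
      unfold pvStep
      split
      · rfl
      · rename_i hlt
        split
        · rename_i hin
          exact absurd (h x List.mem_cons_self hin) hlt
        · rfl
    simp only [List.foldl_cons, hx]
    exact ih (fun y hy => h y (List.mem_cons_of_mem _ hy))

theorem pvFirstHit_min (S : List String) (s1 : String)
    (hp : S.Pairwise (fun a b => PySem.Str.len a ≤ PySem.Str.len b)) :
    ∀ y ∈ S, PySem.Str.isIn y s1 = true → PySem.Str.len (pvFirstHit S s1) ≤ PySem.Str.len y := by
  induction S with
  | nil => intro y hy; simp at hy
  | cons z zs ih =>
    rcases List.pairwise_cons.mp hp with ⟨hz, hzs⟩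
    intro y hy hyin
    rw [pvFirstHit_cons]
    split
    · rcases List.mem_cons.mp hy with rfl | hyzs
      · exact le_refl _
      · exact hz y hyzs
    · rcases List.mem_cons.mp hy with rfl | hyzs
      · simp_all
      · exact ih hzs y hyzs hyin

theorem pvFold_T (vals : List String) (s1 v : String)
    (hv : v = s1 ∨ v = pvFirstHit (PySem.List.sorted vals (fun s => PySem.Str.len s) false) s1) :
    vals.foldl (fun b s2 => pvStep s1 b s2) v
      = pvFirstHit (PySem.List.sorted vals (fun s => PySem.Str.len s) false) s1 := by
  rcases hv with h | h
  · rw [h]; exact pvMain vals s1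
  · rw [h]
    apply pvIdem
    intro x hx hin
    exact pvFirstHit_min _ s1 (PySem.List.sorted_pairwise vals (fun s => PySem.Str.len s)) x
      ((PySem.List.mem_sorted _ _ _ _).mpr hx) hin

theorem pvOut (vals : List String) (ys : List String) (m : PySem.Dict String String)
    (hm : ∀ k ∈ ys, m.getD k "" = k ∨
      m.getD k "" = pvFirstHit (PySem.List.sorted vals (fun s => PySem.Str.len s) false) k)
    (k : String) :
    ((ys.foldl (fun m s1 =>
      vals.foldl (fun m s2 =>
        if PySem.Str.len (m.getD s1 "") ≤ PySem.Str.len s2 then m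
        else if PySem.Str.isIn s2 s1 then m.insert s1 s2 else m) m) m)).getD k ""
      = if k ∈ ys then pvFirstHit (PySem.List.sorted vals (fun s => PySem.Str.len s) false) k
        else m.getD k "" := by
  induction ys generalizing m with
  | nil => simp
  | cons s1 ys ih =>
    simp only [List.foldl_cons]
    have hstep : ∀ k', (vals.foldl (fun m s2 =>
        if PySem.Str.len (m.getD s1 "") ≤ PySem.Str.len s2 then m
        else if PySem.Str.isIn s2 s1 then m.insert s1 s2 else m) m).getD k' ""
          = if k' = s1 then pvFirstHit (PySem.List.sorted vals (fun s => PySem.Str.len s) false) s1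
            else m.getD k' "" := by
      intro k'
      rw [pvInner]
      by_cases hk' : k' = s1
      · rw [if_pos hk', if_pos hk', pvFold_T vals s1 _ (hm s1 List.mem_cons_self)]
      · rw [if_neg hk', if_neg hk']
    rw [ih _ (by
      intro k' hk'
      rw [hstep k']
      by_cases h : k' = s1
      · rw [if_pos h, h]
        exact Or.inr rfl
      · rw [if_neg h]
        exact hm k' (List.mem_cons_of_mem _ hk'))]
    by_cases hys : k ∈ ys
    · rw [if_pos hys, if_pos (List.mem_cons_of_mem _ hys)]
    · rw [if_neg hys, hstep k]
      by_cases hk : k = s1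
      · subst hk
        rw [if_pos rfl, if_pos List.mem_cons_self]
      · rw [if_neg hk, if_neg (by simp [hk, hys])]


theorem pvInit_not_mem (vals : List String) (m : PySem.Dict String String) (cs : String)
    (h : cs ∉ vals) :
    (vals.foldl (fun m s => m.insert s s) m).getD cs "" = m.getD cs "" := by
  induction vals generalizing m with
  | nil => rfl
  | cons s vs ih =>
    simp only [List.foldl_cons]
    rw [ih _ (fun hm => h (List.mem_cons_of_mem _ hm))]
    rw [PySem.Dict.getD_insert]
    simp only [List.mem_cons, not_or] at h
    simp [h.1]

theorem pvInit_mem (vals : List String) (m : PySem.Dict String String) (cs : String)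
    (h : cs ∈ vals) :
    (vals.foldl (fun m s => m.insert s s) m).getD cs "" = cs := by
  induction vals generalizing m with
  | nil => simp at h
  | cons s vs ih =>
    simp only [List.foldl_cons]
    by_cases hv : cs ∈ vs
    · exact ih _ hv
    · rcases List.mem_cons.mp h with rfl | hv'
      · rw [pvInit_not_mem _ _ _ hv, PySem.Dict.getD_insert]
        simp
      · exact absurd hv' hv

-- ===== VERDICT (by name: the statement is the Claim_ definition above) =====
theorem reduce2shortest_py_spec : Claim_equal_reduce2shortest_py := by
  intro l _
  unfold Spec_reduce2shortest_py
  simp only [reduce2shortest_py, reduce2shortest_py_alt]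
  rw [PySem.Dict.items_foldl_insert_fresh]
  · show List.map _ _ = _
    apply List.map_congr_left
    intro p hp
    have hpv : p.2 ∈ (PySem.Dict.ofList l).values := by
      simp only [PySem.Dict.values]
      exact List.mem_map_of_mem hp
    congr 1
    rw [pvOut]
    · rw [if_pos hpv]
    · intro k hk
      exact Or.inl (pvInit_mem _ _ _ hk)
  · intro a _
    exact PySem.Dict.contains_empty _
  · exact PySem.Dict.nodup_keys_ofList l
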